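-- pv_equiv track=rewrite | github.com/slavah8/leetcode | 2711-difference-of-number-of-distinct-values-on-diagonals/2711-difference-of-number-of-distinct-values-on-diagonals.py | differenceOfDistinctValues
-- ===== SOURCE A (Python) =====
-- from typing import List
--
-- def differenceOfDistinctValues(grid: List[List[int]]) -> List[List[int]]:
--     rows = len(grid)
--     cols = len(grid[0])
--
--     def calculate(r, c): # calculate left above and right below diags
--         left_above = set()
--         right_below = set()
--         r0 = r
--         c0 = c
--
--
--         # calculate right below
--         while r + 1 < rows and c + 1 < cols:
--             r += 1
--             c += 1
--             right_below.add(grid[r][c])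
--
--         r = r0
--         c = c0
--
--         # calculate left above
--         while r - 1 >= 0 and c - 1 >= 0:
--             r -= 1
--             c -= 1
--             left_above.add(grid[r][c])
--
--         return abs(len(left_above) - len(right_below))
--
--     answer = [[0] * cols for _ in range(rows)]
--     for r in range(rows):
--         for c in range(cols):
--             answer[r][c] = calculate(r, c)
--
--     return answer
-- ===== SOURCE B (Python) =====
-- from typing import List
--
-- def differenceOfDistinctValues(grid: List[List[int]]) -> List[List[int]]:
--     # One pass per diagonal: prefix distinct counts forward, suffix counts backward.
--     rows = len(grid)
--     cols = len(grid[0])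
--     starts = [(0, c) for c in range(cols)] + [(r, 0) for r in range(1, rows)]
--     res = {}
--     for (r0, c0) in starts:
--         cells = []
--         r, c = r0, c0
--         while r < rows and c < cols:
--             cells.append((r, c))
--             r += 1
--             c += 1
--         seen = set()
--         above = []
--         for (r, c) in cells:
--             above.append(len(seen))
--             seen.add(grid[r][c])
--         seen = set()
--         for (r, c), a in zip(reversed(cells), reversed(above)):
--             res[(r, c)] = abs(a - len(seen))
--             seen.add(grid[r][c])
--     return [[res[(r, c)] for c in range(cols)] for r in range(rows)]
-- ===== Notes on version B (the rewrite author's own statement) =====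
-- stated objective: faster
-- what changed: A re-walks both diagonal arms from scratch for every cell (O(R*C*min(R,C))); B makes one forward and one backward incremental distinct-count sweep per diagonal, storing each cell's answer in a dict, then materializes the matrix (O(R*C)).
-- outside the precondition, e.g. on differenceOfDistinctValues([[1], []]): A returns [[0], [0]], B raises IndexError
import Mathlib
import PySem

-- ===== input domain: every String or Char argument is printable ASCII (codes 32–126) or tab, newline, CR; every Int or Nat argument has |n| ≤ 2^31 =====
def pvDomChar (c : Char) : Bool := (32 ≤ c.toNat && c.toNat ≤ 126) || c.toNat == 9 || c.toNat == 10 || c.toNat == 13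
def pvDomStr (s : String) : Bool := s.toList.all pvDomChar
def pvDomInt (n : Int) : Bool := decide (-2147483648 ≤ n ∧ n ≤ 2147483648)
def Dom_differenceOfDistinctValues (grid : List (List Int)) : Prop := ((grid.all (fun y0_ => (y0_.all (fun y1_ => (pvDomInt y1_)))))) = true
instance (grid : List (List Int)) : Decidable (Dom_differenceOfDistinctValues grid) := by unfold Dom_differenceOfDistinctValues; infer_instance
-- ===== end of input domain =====

-- B replaces A's per-cell re-walk of both diagonal arms by one forward and one backward
-- incremental distinct-count sweep per diagonal (objective: faster).

-- ===== PORT A =====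

-- grid[r][c] for in-range Nat indices (total form of the Python indexing; Pre_ keeps it in range)
def pvCell (grid : List (List Int)) (r c : Nat) : Int :=
  PySem.List.pyGetD (PySem.List.pyGetD grid (r : Int) []) (c : Int) 0

-- 'while r + 1 < rows and c + 1 < cols: r += 1; c += 1; right_below.add(grid[r][c])'
def pvBelowSet (grid : List (List Int)) (rows cols : Nat) (r c : Nat) (s : PySem.Set Int) :
    PySem.Set Int :=
  if h : r + 1 < rows ∧ c + 1 < cols then
    pvBelowSet grid rows cols (r + 1) (c + 1) (PySem.Set.add s (pvCell grid (r + 1) (c + 1)))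
  else s
termination_by rows - r
decreasing_by omega

-- 'while r - 1 >= 0 and c - 1 >= 0: r -= 1; c -= 1; left_above.add(grid[r][c])'
def pvAboveSet (grid : List (List Int)) (r c : Nat) (s : PySem.Set Int) : PySem.Set Int :=
  if 1 ≤ r ∧ 1 ≤ c then
    pvAboveSet grid (r - 1) (c - 1) (PySem.Set.add s (pvCell grid (r - 1) (c - 1)))
  else s
termination_by r

-- 'calculate(r, c)'
def pvCalc (grid : List (List Int)) (rows cols : Nat) (r c : Nat) : Int :=
  ((((pvAboveSet grid r c PySem.Set.empty).length : Int)
    - ((pvBelowSet grid rows cols r c PySem.Set.empty).length : Int)).natAbs : Int)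

-- the preallocated answer matrix filled cell by cell is ported as the nested map over the ranges
def differenceOfDistinctValues (grid : List (List Int)) : List (List Int) :=
  let rows := grid.length
  let cols := (PySem.List.pyGetD grid 0 []).length
  (List.range rows).map fun r => (List.range cols).map fun c => pvCalc grid rows cols r c

-- ===== PORT B =====

-- 'while r < rows and c < cols: cells.append((r, c)); r += 1; c += 1'
def pvDiagCells (rows cols : Nat) (r c : Nat) : List (Nat × Nat) :=
  if h : r < rows ∧ c < cols then (r, c) :: pvDiagCells rows cols (r + 1) (c + 1) else []
termination_by rows - r
decreasing_by omega

-- forward pass: 'above.append(len(seen)); seen.add(grid[r][c])'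
def pvForward (grid : List (List Int)) (cells : List (Nat × Nat)) : List Nat :=
  (cells.foldl
    (fun (acc : List Nat × PySem.Set Int) rc =>
      (acc.1 ++ [acc.2.length], PySem.Set.add acc.2 (pvCell grid rc.1 rc.2)))
    ([], PySem.Set.empty)).1

-- backward pass: 'for (r, c), a in zip(reversed(cells), reversed(above)):
--   res[(r,c)] = abs(a - len(seen)); seen.add(grid[r][c])'
def pvBackward (grid : List (List Int)) (cells : List (Nat × Nat)) (above : List Nat)
    (d : PySem.Dict (Int × Int) Int) : PySem.Dict (Int × Int) Int :=
  ((cells.reverse.zip above.reverse).foldl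
    (fun (acc : PySem.Dict (Int × Int) Int × PySem.Set Int) p =>
      (acc.1.insert ((p.1.1 : Int), (p.1.2 : Int)) (((p.2 : Int) - (acc.2.length : Int)).natAbs),
       PySem.Set.add acc.2 (pvCell grid p.1.1 p.1.2)))
    (d, PySem.Set.empty)).1

def differenceOfDistinctValues_alt (grid : List (List Int)) : List (List Int) :=
  let rows := grid.length
  let cols := (PySem.List.pyGetD grid 0 []).length
  let starts := (List.range cols).map (fun c => ((0 : Nat), c))
                  ++ (List.range' 1 (rows - 1)).map (fun r => (r, (0 : Nat)))
  let res := starts.foldl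
    (fun d s =>
      let cells := pvDiagCells rows cols s.1 s.2
      pvBackward grid cells (pvForward grid cells) d)
    PySem.Dict.empty
  -- 'res[(r, c)]' always hits under Pre_; ported as getD with an unreachable default
  (List.range rows).map fun (r : Nat) =>
    (List.range cols).map fun (c : Nat) => res.getD ((r : Int), (c : Int)) 0

-- ===== PRECONDITION & SPEC =====
-- Pre_ excludes the empty grid (A raises IndexError on grid[0]) and grids with a row shorter
-- than row 0: there A usually raises IndexError, and on the few such ragged grids whose short
-- rows its diagonal walks happen never to index A returns while B's sweep raises IndexError.
def Pre_differenceOfDistinctValues (grid : List (List Int)) : Prop :=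
  grid ≠ [] ∧ ∀ row ∈ grid, (grid.headD []).length ≤ row.length
instance (grid : List (List Int)) : Decidable (Pre_differenceOfDistinctValues grid) := by
  unfold Pre_differenceOfDistinctValues; infer_instance

def pvWitness_differenceOfDistinctValues : List (List Int) := [[1, 2, 3], [3, 1, 5], [4, 2, 1]]

def Spec_differenceOfDistinctValues (grid : List (List Int)) (out : List (List Int)) : Prop :=
  out = differenceOfDistinctValues_alt grid
instance (grid : List (List Int)) (out : List (List Int)) :
    Decidable (Spec_differenceOfDistinctValues grid out) := by
  unfold Spec_differenceOfDistinctValues; infer_instance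

-- ===== CLAIM (what is proved, stated in full; the proofs are below) =====
def Claim_equal_differenceOfDistinctValues : Prop :=
  ∀ (grid : List (List Int)), Dom_differenceOfDistinctValues grid →
    Pre_differenceOfDistinctValues grid →
    Spec_differenceOfDistinctValues grid (differenceOfDistinctValues grid)

-- ===== LEMMAS AND PROOFS =====

-- number of distinct values of a list
def pvDC (l : List Int) : Nat := (PySem.Set.ofList l).length

-- the value both programs compute at position j of a diagonal whose values are 'vals'
def pvAns (vals : List Int) (j : Nat) : Int :=
  (((pvDC (vals.take j) : Int) - (pvDC (vals.drop (j + 1)) : Int)).natAbs : Int)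

theorem pvDC_perm {l₁ l₂ : List Int} (h : ∀ x, x ∈ l₁ ↔ x ∈ l₂) : pvDC l₁ = pvDC l₂ := by
  unfold pvDC
  have h1 := PySem.Set.nodup_ofList (xs := l₁)
  have h2 := PySem.Set.nodup_ofList (xs := l₂)
  have : (PySem.Set.ofList l₁).Perm (PySem.Set.ofList l₂) := by
    rw [List.perm_ext_iff_of_nodup h1 h2]
    intro x; simp [PySem.Set.mem_ofList, h x]
  exact this.length_eq

theorem pvDC_reverse (l : List Int) : pvDC l.reverse = pvDC l :=
  pvDC_perm (by simp)

-- ---- the diagonal cell list ----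

theorem pvDiagCells_cons (rows cols r c : Nat) (h : r < rows ∧ c < cols) :
    pvDiagCells rows cols r c = (r, c) :: pvDiagCells rows cols (r + 1) (c + 1) := by
  rw [pvDiagCells]; rw [dif_pos h]

theorem pvDiagCells_nil (rows cols r c : Nat) (h : ¬ (r < rows ∧ c < cols)) :
    pvDiagCells rows cols r c = [] := by
  rw [pvDiagCells]; rw [dif_neg h]

theorem pvDiagCells_length (rows cols r c : Nat) :
    (pvDiagCells rows cols r c).length = min (rows - r) (cols - c) := by
  fun_induction pvDiagCells rows cols r c with
  | case1 r c h ih => simp [ih]; omega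
  | case2 r c h => simp; omega

theorem pvDiagCells_drop (rows cols : Nat) (j : Nat) : ∀ r c,
    (pvDiagCells rows cols r c).drop j = pvDiagCells rows cols (r + j) (c + j) := by
  induction j with
  | zero => simp
  | succ n ih =>
    intro r c
    by_cases h : r < rows ∧ c < cols
    · rw [pvDiagCells_cons rows cols r c h]
      simpa [Nat.add_comm, Nat.add_assoc, Nat.add_left_comm] using ih (r+1) (c+1)
    · rw [pvDiagCells_nil rows cols r c h, pvDiagCells_nil rows cols _ _ (by omega)]
      simp

theorem pvDiagCells_getElem (rows cols : Nat) : ∀ (j r c : Nat)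
    (h : j < (pvDiagCells rows cols r c).length),
    (pvDiagCells rows cols r c)[j] = (r + j, c + j) := by
  intro j
  induction j with
  | zero =>
    intro r c h
    have hc : r < rows ∧ c < cols := by
      by_contra hc
      rw [pvDiagCells_nil rows cols r c hc] at h
      simp at h
    simp [pvDiagCells_cons rows cols r c hc]
  | succ n ih =>
    intro r c h
    have hc : r < rows ∧ c < cols := by
      by_contra hc
      rw [pvDiagCells_nil rows cols r c hc] at h
      simp at h
    have hlt : n < (pvDiagCells rows cols (r + 1) (c + 1)).length := by
      rw [pvDiagCells_cons rows cols r c hc] at h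
      simpa using h
    simp only [pvDiagCells_cons rows cols r c hc, List.getElem_cons_succ]
    rw [ih (r + 1) (c + 1) hlt]
    have h1 : r + 1 + n = r + (n + 1) := by omega
    have h2 : c + 1 + n = c + (n + 1) := by omega
    rw [h1, h2]

theorem pvDiagCells_getElem? (rows cols : Nat) (j r c : Nat)
    (h : j < (pvDiagCells rows cols r c).length) :
    (pvDiagCells rows cols r c)[j]? = some (r + j, c + j) := by
  rw [List.getElem?_eq_getElem h, pvDiagCells_getElem rows cols j r c h]

theorem pvDiagCells_mem_diff (rows cols : Nat) : ∀ (r c : Nat),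
    ∀ p ∈ pvDiagCells rows cols r c, (p.1 : Int) - (p.2 : Int) = (r : Int) - (c : Int) := by
  intro r c
  fun_induction pvDiagCells rows cols r c with
  | case1 r c h ih =>
    intro p hp
    rcases List.mem_cons.mp hp with h1 | h1
    · simp [h1]
    · have := ih p h1; rw [this]; push_cast; ring
  | case2 r c h => simp

theorem pvDiagCells_mem_le (rows cols : Nat) : ∀ (r c : Nat),
    ∀ p ∈ pvDiagCells rows cols r c, r ≤ p.1 := by
  intro r c
  fun_induction pvDiagCells rows cols r c with
  | case1 r c h ih =>
    intro p hp
    rcases List.mem_cons.mp hp with h1 | h1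
    · simp [h1]
    · have := ih p h1; omega
  | case2 r c h => simp

theorem pvDiagCells_pairwise (rows cols r c : Nat) :
    (pvDiagCells rows cols r c).Pairwise (fun p q => p.1 < q.1) := by
  fun_induction pvDiagCells rows cols r c with
  | case1 r c h ih =>
    refine List.pairwise_cons.mpr ⟨?_, ih⟩
    intro p hp
    have := pvDiagCells_mem_le rows cols (r + 1) (c + 1) p hp
    omega
  | case2 r c h => exact List.Pairwise.nil

-- ---- port A reduces to pvAns ----

def pvUpList (grid : List (List Int)) (r c : Nat) : List Int :=
  if 1 ≤ r ∧ 1 ≤ c then pvCell grid (r - 1) (c - 1) :: pvUpList grid (r - 1) (c - 1) else []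
termination_by r

theorem pvAboveSet_eq (grid : List (List Int)) : ∀ r c s,
    pvAboveSet grid r c s = List.foldl PySem.Set.add s (pvUpList grid r c) := by
  intro r c s
  fun_induction pvAboveSet grid r c s with
  | case1 r c s h ih => rw [pvUpList, if_pos h]; simpa using ih
  | case2 r c s h => rw [pvUpList, if_neg h]; rfl

theorem pvBelowSet_eq (grid : List (List Int)) (rows cols : Nat) : ∀ r c s,
    pvBelowSet grid rows cols r c s =
      List.foldl PySem.Set.add s
        ((pvDiagCells rows cols (r + 1) (c + 1)).map fun p => pvCell grid p.1 p.2) := by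
  intro r c s
  fun_induction pvBelowSet grid rows cols r c s with
  | case1 r c s h ih => rw [pvDiagCells_cons rows cols _ _ h]; simpa using ih
  | case2 r c s h => rw [pvDiagCells_nil rows cols _ _ h]; rfl

theorem pvUpList_reverse (grid : List (List Int)) (rows cols : Nat) :
    ∀ m r c, m = min r c → r < rows → c < cols →
    (pvUpList grid r c).reverse =
      ((pvDiagCells rows cols (r - m) (c - m)).take m).map fun p => pvCell grid p.1 p.2 := by
  intro m
  induction m with
  | zero =>
    intro r c hm hr hc
    rw [pvUpList, if_neg (by omega)]
    simp
  | succ n ih =>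
    intro r c hm hr hc
    rw [pvUpList, if_pos (by omega)]
    have ihh := ih (r - 1) (c - 1) (by omega) (by omega) (by omega)
    have hlen : n < (pvDiagCells rows cols (r - (n + 1)) (c - (n + 1))).length := by
      rw [pvDiagCells_length]; omega
    rw [List.reverse_cons, ihh, List.take_add_one,
        pvDiagCells_getElem? rows cols n _ _ hlen]
    have e1 : r - 1 - n = r - (n + 1) := by omega
    have e2 : c - 1 - n = c - (n + 1) := by omega
    have e3 : r - (n + 1) + n = r - 1 := by omega
    have e4 : c - (n + 1) + n = c - 1 := by omega
    rw [e1, e2]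
    simp [e3, e4]

theorem pvCalc_eq (grid : List (List Int)) (rows cols r c : Nat) (hr : r < rows) (hc : c < cols) :
    pvCalc grid rows cols r c =
      pvAns ((pvDiagCells rows cols (r - min r c) (c - min r c)).map fun p => pvCell grid p.1 p.2)
        (min r c) := by
  unfold pvCalc
  have ha : (pvAboveSet grid r c PySem.Set.empty).length
      = pvDC (((pvDiagCells rows cols (r - min r c) (c - min r c)).map
          fun p => pvCell grid p.1 p.2).take (min r c)) := by
    rw [pvAboveSet_eq]
    have h0 : List.foldl PySem.Set.add PySem.Set.empty (pvUpList grid r c)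
        = PySem.Set.ofList (pvUpList grid r c) := (PySem.Set.ofList_eq_foldl _).symm
    rw [h0]
    show pvDC (pvUpList grid r c) = _
    rw [← pvDC_reverse (pvUpList grid r c),
        pvUpList_reverse grid rows cols (min r c) r c rfl hr hc, List.map_take]
  have hb : (pvBelowSet grid rows cols r c PySem.Set.empty).length
      = pvDC (((pvDiagCells rows cols (r - min r c) (c - min r c)).map
          fun p => pvCell grid p.1 p.2).drop (min r c + 1)) := by
    rw [pvBelowSet_eq]
    have h0 : List.foldl PySem.Set.add PySem.Set.empty
        ((pvDiagCells rows cols (r + 1) (c + 1)).map fun p => pvCell grid p.1 p.2)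
        = PySem.Set.ofList
            ((pvDiagCells rows cols (r + 1) (c + 1)).map fun p => pvCell grid p.1 p.2) :=
      (PySem.Set.ofList_eq_foldl _).symm
    rw [h0, ← List.map_drop, pvDiagCells_drop]
    have e1 : r - min r c + (min r c + 1) = r + 1 := by omega
    have e2 : c - min r c + (min r c + 1) = c + 1 := by omega
    rw [e1, e2]
    rfl
  rw [ha, hb]
  rfl

-- ---- port B: forward pass ----

theorem pvForward_inv (grid : List (List Int)) :
    ∀ (cells : List (Nat × Nat)) A (s : PySem.Set Int),
    (cells.foldl
      (fun (acc : List Nat × PySem.Set Int) rc =>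
        (acc.1 ++ [acc.2.length], PySem.Set.add acc.2 (pvCell grid rc.1 rc.2)))
      (A, s)).1 =
    A ++ (List.range cells.length).map
      (fun j =>
        (List.foldl PySem.Set.add s ((cells.take j).map fun p => pvCell grid p.1 p.2)).length) := by
  intro cells
  induction cells with
  | nil => simp
  | cons rc t ih =>
    intro A s
    simp only [List.foldl_cons, List.length_cons]
    rw [ih, List.range_succ_eq_map]
    simp [List.append_assoc, Function.comp]

theorem pvForward_length (grid : List (List Int)) (cells : List (Nat × Nat)) :
    (pvForward grid cells).length = cells.length := by
  unfold pvForward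
  rw [pvForward_inv]
  simp

theorem pvForward_getElem (grid : List (List Int)) (cells : List (Nat × Nat)) (j : Nat)
    (h : j < cells.length) :
    (pvForward grid cells)[j]'(by rw [pvForward_length]; exact h) =
      pvDC ((cells.take j).map fun p => pvCell grid p.1 p.2) := by
  have he : pvForward grid cells = (List.range cells.length).map
      (fun j => (List.foldl PySem.Set.add PySem.Set.empty
        ((cells.take j).map fun p => pvCell grid p.1 p.2)).length) := by
    unfold pvForward
    rw [pvForward_inv]
    simp
  rw [List.getElem_of_eq he]
  simp [pvDC, PySem.Set.ofList_eq_foldl]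

-- ---- port B: backward pass ----

def pvBackRec (grid : List (List Int)) :
    List (Nat × Nat) → List Nat → PySem.Dict (Int × Int) Int → PySem.Dict (Int × Int) Int
  | [], _, d => d
  | _ :: _, [], d => d
  | rc :: t, a :: u, d =>
      (pvBackRec grid t u d).insert ((rc.1 : Int), (rc.2 : Int))
        (((a : Int) -
          ((PySem.Set.ofList ((t.map fun p => pvCell grid p.1 p.2).reverse)).length : Int)).natAbs)

theorem pvBackward_pair (grid : List (List Int)) :
    ∀ (cells : List (Nat × Nat)) (above : List Nat) d,
    cells.length = above.length →
    ((cells.reverse.zip above.reverse).foldl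
      (fun (acc : PySem.Dict (Int × Int) Int × PySem.Set Int) p =>
        (acc.1.insert ((p.1.1 : Int), (p.1.2 : Int)) (((p.2 : Int) - (acc.2.length : Int)).natAbs),
         PySem.Set.add acc.2 (pvCell grid p.1.1 p.1.2)))
      (d, PySem.Set.empty)) =
    (pvBackRec grid cells above d,
     PySem.Set.ofList ((cells.map fun p => pvCell grid p.1 p.2).reverse)) := by
  intro cells
  induction cells with
  | nil =>
    intro above d h
    simp at h
    simp [pvBackRec, PySem.Set.ofList]
  | cons rc t ih =>
    intro above d h
    cases above with
    | nil => simp at h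
    | cons a u =>
      have hlen : t.length = u.length := by simpa using h
      have hz : (rc :: t).reverse.zip (a :: u).reverse
          = (t.reverse.zip u.reverse) ++ [(rc, a)] := by
        simp [List.zip_append, hlen]
      rw [hz, List.foldl_append, ih u d hlen]
      simp [pvBackRec]
      rw [PySem.Set.ofList_eq_foldl ((List.map (fun p => pvCell grid p.1 p.2) t).reverse
            ++ [pvCell grid rc.1 rc.2]),
          List.foldl_append, ← PySem.Set.ofList_eq_foldl]
      simp [List.foldl]

theorem pvBackward_eq (grid : List (List Int)) (cells : List (Nat × Nat)) (above : List Nat)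
    (d : PySem.Dict (Int × Int) Int) (h : cells.length = above.length) :
    pvBackward grid cells above d = pvBackRec grid cells above d := by
  unfold pvBackward
  rw [pvBackward_pair grid cells above d h]

theorem pvBackRec_getD_ne (grid : List (List Int)) :
    ∀ (cells : List (Nat × Nat)) above d (k : Int × Int),
    (∀ p ∈ cells, k ≠ ((p.1 : Int), (p.2 : Int))) →
    (pvBackRec grid cells above d).getD k 0 = d.getD k 0 := by
  intro cells
  induction cells with
  | nil => intro above d k _; cases above <;> rfl
  | cons rc t ih =>
    intro above d k hk
    cases above with
    | nil => rfl
    | cons a u =>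
      show ((pvBackRec grid t u d).insert _ _).getD k 0 = d.getD k 0
      rw [PySem.Dict.getD_insert_of_ne _ _ _ (hk rc (by simp))]
      exact ih u d k (fun p hp => hk p (List.mem_cons_of_mem _ hp))

theorem pvBackRec_getD (grid : List (List Int)) :
    ∀ (cells : List (Nat × Nat)) above (d : PySem.Dict (Int × Int) Int) (j : Nat)
      (hj : j < cells.length)
      (hl : above.length = cells.length)
      (_hp : cells.Pairwise (fun p q => p.1 < q.1)),
    (pvBackRec grid cells above d).getD ((cells[j].1 : Int), (cells[j].2 : Int)) 0 =
      (((above[j]'(by omega) : Int) -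
        (pvDC ((cells.drop (j + 1)).map fun p => pvCell grid p.1 p.2) : Int)).natAbs : Int) := by
  intro cells
  induction cells with
  | nil => intro above d j hj; simp at hj
  | cons rc t ih =>
    intro above d j hj hl hp
    cases above with
    | nil => simp at hl
    | cons a u =>
      cases j with
      | zero =>
        simp only [List.getElem_cons_zero]
        show ((pvBackRec grid t u d).insert _ _).getD _ 0 = _
        rw [PySem.Dict.getD_insert_self]
        simp only [List.drop_succ_cons, List.drop_zero]
        have hrev : (PySem.Set.ofList ((t.map fun p => pvCell grid p.1 p.2).reverse)).length
            = pvDC (t.map fun p => pvCell grid p.1 p.2) := pvDC_reverse _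
        rw [hrev]
      | succ n =>
        have hne : ((((rc :: t)[n + 1]).1 : Int), (((rc :: t)[n + 1]).2 : Int))
            ≠ ((rc.1 : Int), (rc.2 : Int)) := by
          have hmem : (rc :: t)[n + 1] ∈ t := by
            simp only [List.getElem_cons_succ]
            exact List.getElem_mem _
          have := (List.pairwise_cons.mp hp).1 _ hmem
          intro he
          have h1 : (((rc :: t)[n + 1]).1 : Int) = (rc.1 : Int) := congrArg Prod.fst he
          have h2 : ((rc :: t)[n + 1]).1 = rc.1 := by exact_mod_cast h1
          omega
        show ((pvBackRec grid t u d).insert _ _).getD _ 0 = _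
        rw [PySem.Dict.getD_insert_of_ne _ _ _ hne]
        simp only [List.getElem_cons_succ, List.drop_succ_cons]
        exact ih u d n (by simpa using hj) (by simpa using hl) (List.pairwise_cons.mp hp).2

-- ---- one diagonal, end to end ----

theorem pvDiag_getD (grid : List (List Int)) (rows cols a b : Nat)
    (d : PySem.Dict (Int × Int) Int) (j : Nat) (hj : j < (pvDiagCells rows cols a b).length) :
    (pvBackward grid (pvDiagCells rows cols a b)
        (pvForward grid (pvDiagCells rows cols a b)) d).getD
        (((a + j : Nat) : Int), ((b + j : Nat) : Int)) 0 =
      pvAns ((pvDiagCells rows cols a b).map fun p => pvCell grid p.1 p.2) j := by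
  rw [pvBackward_eq grid _ _ d (pvForward_length grid _).symm]
  have hkey : (((a + j : Nat) : Int), ((b + j : Nat) : Int))
      = (((pvDiagCells rows cols a b)[j].1 : Int), ((pvDiagCells rows cols a b)[j].2 : Int)) := by
    rw [pvDiagCells_getElem rows cols j a b hj]
  rw [hkey,
    pvBackRec_getD grid _ _ d j hj (pvForward_length grid _) (pvDiagCells_pairwise rows cols a b)]
  rw [pvForward_getElem grid _ j hj]
  unfold pvAns
  rw [List.map_take, List.map_drop]

theorem pvDiag_getD_ne (grid : List (List Int)) (rows cols a b : Nat)
    (d : PySem.Dict (Int × Int) Int) (k : Int × Int) (hk : k.1 - k.2 ≠ (a : Int) - (b : Int)) :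
    (pvBackward grid (pvDiagCells rows cols a b)
        (pvForward grid (pvDiagCells rows cols a b)) d).getD k 0 = d.getD k 0 := by
  rw [pvBackward_eq grid _ _ d (pvForward_length grid _).symm]
  apply pvBackRec_getD_ne
  intro p hp he
  have hd := pvDiagCells_mem_diff rows cols a b p hp
  rw [he] at hk
  simp at hk
  exact hk hd

-- ---- the fold over the diagonal starts ----

def pvStep (grid : List (List Int)) (rows cols : Nat) (d : PySem.Dict (Int × Int) Int)
    (s : Nat × Nat) : PySem.Dict (Int × Int) Int :=
  pvBackward grid (pvDiagCells rows cols s.1 s.2)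
    (pvForward grid (pvDiagCells rows cols s.1 s.2)) d

theorem pvFold_getD_ne (grid : List (List Int)) (rows cols : Nat) :
    ∀ (starts : List (Nat × Nat)) (d : PySem.Dict (Int × Int) Int) (k : Int × Int),
    (∀ s ∈ starts, k.1 - k.2 ≠ (s.1 : Int) - (s.2 : Int)) →
    (starts.foldl (pvStep grid rows cols) d).getD k 0 = d.getD k 0 := by
  intro starts
  induction starts with
  | nil => intro d k _; rfl
  | cons s t ih =>
    intro d k hk
    simp only [List.foldl_cons]
    rw [ih _ k (fun p hp => hk p (List.mem_cons_of_mem _ hp))]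
    exact pvDiag_getD_ne grid rows cols s.1 s.2 d k (hk s (by simp))

theorem pvFold_getD (grid : List (List Int)) (rows cols : Nat) :
    ∀ (starts : List (Nat × Nat)) (d : PySem.Dict (Int × Int) Int) (a b j : Nat),
    (a, b) ∈ starts →
    starts.Pairwise (fun s t => (s.1 : Int) - (s.2 : Int) ≠ (t.1 : Int) - (t.2 : Int)) →
    j < (pvDiagCells rows cols a b).length →
    (starts.foldl (pvStep grid rows cols) d).getD (((a + j : Nat) : Int), ((b + j : Nat) : Int)) 0
      = pvAns ((pvDiagCells rows cols a b).map fun p => pvCell grid p.1 p.2) j := by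
  intro starts
  induction starts with
  | nil => intro d a b j hm; simp at hm
  | cons s t ih =>
    intro d a b j hm hp hj
    simp only [List.foldl_cons]
    rcases List.mem_cons.mp hm with he | he
    · rw [pvFold_getD_ne grid rows cols t _ _ ?_]
      · rw [← he]
        exact pvDiag_getD grid rows cols a b d j hj
      · intro q hq
        have hne := (List.pairwise_cons.mp hp).1 q hq
        rw [← he] at hne
        push_cast
        omega
    · exact ih _ a b j he (List.pairwise_cons.mp hp).2 hj

theorem pvStarts_pairwise (rows cols : Nat) :
    ((List.range cols).map (fun c => ((0 : Nat), c))
      ++ (List.range' 1 (rows - 1)).map (fun r => (r, (0 : Nat)))).Pairwise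
      (fun s t => (s.1 : Int) - (s.2 : Int) ≠ (t.1 : Int) - (t.2 : Int)) := by
  rw [List.pairwise_append]
  refine ⟨?_, ?_, ?_⟩
  · rw [List.pairwise_map]
    exact (List.pairwise_lt_range).imp (by intro a b hab; simp; omega)
  · rw [List.pairwise_map]
    exact (List.pairwise_lt_range').imp (by intro a b hab; simp; omega)
  · intro p hp q hq
    rcases List.mem_map.mp hp with ⟨c0, _, rfl⟩
    rcases List.mem_map.mp hq with ⟨r0, hr0, rfl⟩
    have : 1 ≤ r0 := (List.mem_range'_1.mp hr0).1
    simp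
    omega

theorem pvStarts_mem (rows cols r c : Nat) (hr : r < rows) (hc : c < cols) :
    (r - min r c, c - min r c) ∈
      ((List.range cols).map (fun c => ((0 : Nat), c))
        ++ (List.range' 1 (rows - 1)).map (fun r => (r, (0 : Nat)))) := by
  rw [List.mem_append]
  by_cases h : r ≤ c
  · left
    rw [List.mem_map]
    refine ⟨c - r, ?_, ?_⟩
    · rw [List.mem_range]; omega
    · have : min r c = r := by omega
      rw [this]
      simp
  · right
    rw [List.mem_map]
    refine ⟨r - c, ?_, ?_⟩
    · rw [List.mem_range'_1]; omega
    · have : min r c = c := by omega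
      rw [this]
      simp

-- ===== VERDICT (by name: the statement is the Claim_ definition above) =====
theorem differenceOfDistinctValues_spec : Claim_equal_differenceOfDistinctValues := by
  intro grid _ _
  unfold Spec_differenceOfDistinctValues
  unfold differenceOfDistinctValues differenceOfDistinctValues_alt
  dsimp only
  apply List.map_congr_left
  intro r hr
  apply List.map_congr_left
  intro c hc
  rw [List.mem_range] at hr hc
  set rows := grid.length
  set cols := (PySem.List.pyGetD grid 0 []).length
  have hm : min r c ≤ r ∧ min r c ≤ c := ⟨Nat.min_le_left r c, Nat.min_le_right r c⟩
  have hkey1 : r - min r c + min r c = r := by omega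
  have hkey2 : c - min r c + min r c = c := by omega
  have hj : min r c < (pvDiagCells rows cols (r - min r c) (c - min r c)).length := by
    rw [pvDiagCells_length]; omega
  have hfold := pvFold_getD grid rows cols
    ((List.range cols).map (fun c => ((0 : Nat), c))
      ++ (List.range' 1 (rows - 1)).map (fun r => (r, (0 : Nat))))
    PySem.Dict.empty (r - min r c) (c - min r c) (min r c)
    (pvStarts_mem rows cols r c hr hc) (pvStarts_pairwise rows cols) hj
  rw [hkey1, hkey2] at hfold
  rw [pvCalc_eq grid rows cols r c hr hc]
  exact hfold.symm
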